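-- pv_equiv track=rewrite | github.com/DulalBuet/Computer_Networking | NS3/Code/plot_figure10.py | value_at_time
-- ===== SOURCE A (Python) =====
-- def value_at_time(times, values, target_t):
--     """Return the last sampled cwnd value at or before target_t."""
--     v = values[0] if values else 0
--     for t, val in zip(times, values):
--         if t <= target_t:
--             v = val
--         else:
--             break
--     return v
-- ===== SOURCE B (Python) =====
-- def value_at_time(times, values, target_t):
--     """Return the last sampled cwnd value at or before target_t (times ascending)."""
--     n = min(len(times), len(values))
--     lo, hi = 0, n
--     while lo < hi:
--         mid = (lo + hi) // 2
--         if times[mid] <= target_t: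
--             lo = mid + 1
--         else:
--             hi = mid
--     if lo:
--         return values[lo - 1]
--     return values[0] if values else 0
-- ===== Notes on version B (the rewrite author's own statement) =====
-- stated objective: faster
-- what changed: A linearly scans zip(times, values) carrying the current value and breaking at the first late sample; B binary-searches the sorted times for the first index past target_t and does one indexed lookup into values.
-- outside the precondition, e.g. on value_at_time([3, 1], [10, 20], 2): A returns 10, B returns 20
import Mathlib
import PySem

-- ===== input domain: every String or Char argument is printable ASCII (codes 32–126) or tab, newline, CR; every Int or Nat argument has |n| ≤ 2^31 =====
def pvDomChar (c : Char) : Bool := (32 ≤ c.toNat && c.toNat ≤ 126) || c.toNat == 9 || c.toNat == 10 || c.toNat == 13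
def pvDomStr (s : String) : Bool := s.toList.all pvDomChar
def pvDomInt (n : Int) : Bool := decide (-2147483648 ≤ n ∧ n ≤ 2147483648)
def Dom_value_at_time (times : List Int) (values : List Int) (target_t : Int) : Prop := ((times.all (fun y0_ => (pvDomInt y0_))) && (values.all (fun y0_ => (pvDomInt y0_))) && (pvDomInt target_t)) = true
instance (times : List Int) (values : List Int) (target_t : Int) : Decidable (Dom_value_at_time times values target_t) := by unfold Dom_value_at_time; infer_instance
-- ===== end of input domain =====

-- B replaces A's linear scan by a binary search over the sorted times for the first index past
-- target_t (O(log n) vs O(n)); Pre_ requires the zipped prefix of times to be nondecreasing.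

-- ===== PORT A =====
-- the for-loop over zip(times, values) with break, carrying v
def vatLoop (l : List (Int × Int)) (target_t : Int) (v : Int) : Int :=
  match l with
  | [] => v
  | (t, val) :: rest => if t ≤ target_t then vatLoop rest target_t val else v

def value_at_time (times : List Int) (values : List Int) (target_t : Int) : Int :=
  let v : Int := match values with | [] => 0 | x :: _ => x
  vatLoop (times.zip values) target_t v

-- ===== PORT B =====
-- the while-loop: binary search for the first index in [lo, hi) with times[i] > target_t
def vatBS (times : List Int) (target_t : Int) (lo hi : Nat) : Nat :=
  if lo < hi then
    let mid := (lo + hi) / 2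
    if times.getD mid 0 ≤ target_t then vatBS times target_t (mid + 1) hi
    else vatBS times target_t lo mid
  else lo
termination_by hi - lo
decreasing_by all_goals omega

def value_at_time_alt (times : List Int) (values : List Int) (target_t : Int) : Int :=
  let n := min times.length values.length
  let i := vatBS times target_t 0 n
  if i ≠ 0 then values.getD (i - 1) 0
  else match values with | [] => 0 | x :: _ => x

-- ===== PRECONDITION & SPEC =====
-- Pre_ excludes inputs whose zipped prefix of times is not sorted ascending: B's binary search
-- assumes a monotone time axis (the function's sampling-trace domain), while A's early-break
-- value on unsorted times is an accident of its scan order.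
def Pre_value_at_time (times : List Int) (values : List Int) (_target_t : Int) : Prop :=
  List.Pairwise (· ≤ ·) (times.take (min times.length values.length))
instance (times : List Int) (values : List Int) (target_t : Int) : Decidable (Pre_value_at_time times values target_t) := by unfold Pre_value_at_time; infer_instance

def pvWitness_value_at_time : List Int × List Int × Int := ([1, 2, 3], [10, 20, 30], 2)

def Spec_value_at_time (times : List Int) (values : List Int) (target_t : Int) (out : Int) : Prop := out = value_at_time_alt times values target_t
instance (times : List Int) (values : List Int) (target_t : Int) (out : Int) : Decidable (Spec_value_at_time times values target_t out) := by unfold Spec_value_at_time; infer_instance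

-- ===== CLAIM (what is proved, stated in full; the proofs are below) =====
def Claim_equal_value_at_time : Prop := ∀ (times : List Int) (values : List Int) (target_t : Int), Dom_value_at_time times values target_t → Pre_value_at_time times values target_t → Spec_value_at_time times values target_t (value_at_time times values target_t)

-- ===== LEMMAS AND PROOFS =====

-- A's loop computes the last second-component of the takeWhile prefix (default v).
theorem vatLoop_eq_takeWhile (l : List (Int × Int)) (target_t v : Int) :
    vatLoop l target_t v = ((l.takeWhile (fun p => p.1 ≤ target_t)).map Prod.snd).getLastD v := by
  induction l generalizing v with
  | nil => simp [vatLoop]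
  | cons a rest ih =>
    obtain ⟨t, val⟩ := a
    by_cases h : t ≤ target_t
    · simp only [vatLoop, if_pos h, ih]
      rw [List.takeWhile_cons_of_pos (by simpa), List.map_cons, List.getLastD_cons]
    · simp [vatLoop, h]

-- takeWhile prefix: every element of it satisfies the predicate
theorem tw_pass {a : Type} (q : a -> Bool) (l : List a) (j : Nat)
    (hj : j < (l.takeWhile q).length) : q ((l.takeWhile q)[j]) = true :=
  List.mem_takeWhile_imp (List.getElem_mem hj)

-- takeWhile prefix: the first element after it fails the predicate
theorem tw_fail {a : Type} (q : a -> Bool) (l : List a)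
    (h : (l.takeWhile q).length < l.length) : q (l[(l.takeWhile q).length]'h) = false := by
  induction l with
  | nil => simp at h
  | cons x t ih =>
    by_cases hx : q x = true
    · simpa [List.takeWhile_cons_of_pos hx] using ih (by simpa [List.takeWhile_cons_of_pos hx] using h)
    · simp only [Bool.not_eq_true] at hx
      have h0 : List.takeWhile q (x :: t) = [] := List.takeWhile_cons_of_neg (by simp [hx])
      revert h
      simp [h0, hx]

-- tw_fail with the index abstracted (avoids a dependent rewrite at the use site)
theorem tw_fail' {a : Type} (q : a -> Bool) (l : List a) (j : Nat)
    (hj : j = (l.takeWhile q).length) (h : j < l.length) : q (l[j]'h) = false := by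
  subst hj; exact tw_fail q l h

-- monotone time axis: a sorted prefix gives getD-monotonicity on indices below n
theorem getD_mono (times : List Int) (n : Nat) (hn : n ≤ times.length)
    (hs : List.Pairwise (· ≤ ·) (times.take n)) {i j : Nat} (hij : i ≤ j) (hj : j < n) :
    times.getD i 0 ≤ times.getD j 0 := by
  rcases Nat.eq_or_lt_of_le hij with he | hl
  · subst he; exact le_refl _
  · have h1 : i < (times.take n).length := by simp [List.length_take]; omega
    have h2 : j < (times.take n).length := by simp [List.length_take]; omega
    have hp := List.pairwise_iff_getElem.mp hs i j h1 h2 hl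
    rw [List.getD_eq_getElem _ _ (by omega : i < times.length),
        List.getD_eq_getElem _ _ (by omega : j < times.length)]
    simpa [List.getElem_take] using hp

-- binary search invariant: result r is in [lo, hi], its predecessor (if moved) passes,
-- and r itself (if below hi) fails
theorem vatBS_spec (times : List Int) (target_t : Int) :
    ∀ fuel lo hi, hi - lo ≤ fuel → lo ≤ hi →
    let r := vatBS times target_t lo hi
    lo ≤ r ∧ r ≤ hi ∧ (r = lo ∨ times.getD (r - 1) 0 ≤ target_t) ∧
      (r = hi ∨ ¬ times.getD r 0 ≤ target_t) := by
  intro fuel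
  induction fuel with
  | zero =>
    intro lo hi h1 h2
    have : lo = hi := by omega
    subst this
    rw [vatBS, if_neg (by omega)]
    exact ⟨le_refl _, le_refl _, Or.inl rfl, Or.inl rfl⟩
  | succ m ih =>
    intro lo hi h1 h2
    rw [vatBS]
    by_cases hlt : lo < hi
    · rw [if_pos hlt]
      by_cases hp : times.getD ((lo + hi) / 2) 0 ≤ target_t
      · rw [if_pos hp]
        obtain ⟨a1, a2, a3, a4⟩ := ih ((lo + hi) / 2 + 1) hi (by omega) (by omega)
        refine ⟨by omega, a2, ?_, a4⟩
        rcases a3 with h | h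
        · right; rw [h]; simpa using hp
        · right; exact h
      · rw [if_neg hp]
        obtain ⟨a1, a2, a3, a4⟩ := ih lo ((lo + hi) / 2) (by omega) (by omega)
        refine ⟨a1, by omega, a3, ?_⟩
        rcases a4 with h | h
        · right; rw [h]; exact hp
        · right; exact h
    · rw [if_neg hlt]
      exact ⟨le_refl _, h2, Or.inl rfl, Or.inl (by omega)⟩

-- ===== VERDICT (by name: the statement is the Claim_ definition above) =====
theorem value_at_time_spec : Claim_equal_value_at_time := by
  intro times values target_t _ hpre
  unfold Spec_value_at_time value_at_time value_at_time_alt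
  set n := min times.length values.length with hn
  set l := times.zip values with hl
  set q : Int × Int → Bool := fun p => decide (p.1 ≤ target_t) with hq
  have hlen : l.length = n := by simp [hl, hn]
  have hnt : n ≤ times.length := by omega
  obtain ⟨-, hle, hprev, hcur⟩ :=
    vatBS_spec times target_t n 0 n (by omega) (Nat.zero_le _)
  set r := vatBS times target_t 0 n with hr
  set k := (l.takeWhile q).length with hk
  have hkn : k ≤ n := hlen ▸ (List.takeWhile_prefix q).length_le
  have hkr : k = r := by
    rcases Nat.lt_trichotomy k r with h | h | h
    · -- k < r: index k fails (tw_fail), yet pass(r-1) with k ≤ r-1 gives pass k by monotonicity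
      exfalso
      have hr1 : r ≠ 0 := by omega
      have hpassr1 : times.getD (r - 1) 0 ≤ target_t :=
        hprev.resolve_left (by omega)
      have hkpass : times.getD k 0 ≤ target_t :=
        le_trans (getD_mono times n hnt hpre (by omega) (by omega)) hpassr1
      have hkl : k < l.length := by omega
      have hfl := tw_fail' q l k hk hkl
      have : l[k]'hkl = (times[k]'(by omega), values[k]'(by omega)) := List.getElem_zip
      rw [this] at hfl
      simp only [hq, decide_eq_false_iff_not] at hfl
      exact hfl (by rwa [List.getD_eq_getElem _ _ (by omega : k < times.length)] at hkpass)
    · exact h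
    · -- r < k: index r passes (tw_pass), yet hcur says it fails
      exfalso
      have hrn : r < n := by omega
      have hfailr : ¬ times.getD r 0 ≤ target_t :=
        hcur.resolve_left (by omega)
      have hrl : r < l.length := by omega
      have hp := tw_pass q l r (hk ▸ h)
      have hpre' := (List.takeWhile_prefix q (l := l)).getElem (hk ▸ h)
      rw [hpre'] at hp
      have : l[r]'hrl = (times[r]'(by omega), values[r]'(by omega)) := List.getElem_zip
      simp only [hq, decide_eq_true_eq] at hp
      apply hfailr
      rw [List.getD_eq_getElem _ _ (by omega : r < times.length)]
      have h1 := congrArg Prod.fst this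
      simp only at h1
      rwa [← h1]
  rw [vatLoop_eq_takeWhile]
  by_cases hr0 : r = 0
  · have : l.takeWhile q = [] := List.eq_nil_of_length_eq_zero (by omega)
    simp [← hq, this, ← hr, hr0]
  · simp only [← hq, ← hr]
    rw [if_pos hr0]
    have hk1 : 1 ≤ k := by omega
    have hk1l : k - 1 < (l.takeWhile q).length := by omega
    have hkv : k - 1 < values.length := by omega
    rw [List.getLastD_eq_getLast?, List.getLast?_eq_getElem?, List.length_map, ← hk]
    have e1 : ((l.takeWhile q).map Prod.snd)[k-1]? = some (((l.takeWhile q)[k-1]'hk1l).2) := by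
      rw [List.getElem?_map, List.getElem?_eq_getElem hk1l]; rfl
    have e2 : (l.takeWhile q)[k-1]'hk1l = l[k-1]'(by omega) :=
      (List.takeWhile_prefix q).getElem hk1l
    have e3 : l[k-1]'(by omega) = (times[k-1]'(by omega), values[k-1]'hkv) := List.getElem_zip
    rw [e1, e2, e3, Option.getD_some]
    have : r - 1 = k - 1 := by omega
    rw [List.getD_eq_getElem?_getD, this, List.getElem?_eq_getElem hkv, Option.getD_some]
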